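-- pv_equiv track=rewrite | github.com/anwa/csv2influxdb | csv2influxdb.py | extract_blood_pressure_data
-- ===== SOURCE A (Python) =====
-- def extract_blood_pressure_data(lines):
--     blood_pressure_data = []
--     start_collecting = False
--     for line in lines:
--         if "Blutdruck" in line:
--             start_collecting = True
--             continue
--         if start_collecting:
--             if line.strip() == "" or not line.split(";")[0].strip():
--                 break
--             if "MAD =" in line or "Ø =" in line:
--                 continue
--             blood_pressure_data.append(line.strip())
--     return blood_pressure_data
-- ===== SOURCE B (Python) =====
-- def extract_blood_pressure_data(lines):
--     # Split the input into segments delimited by 'Blutdruck' marker lines;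
--     # the markers themselves vanish as separators.  Everything after the
--     # first marker is the concatenation of segments[1:]; truncate that
--     # stream at the first blank/empty-first-field line, drop the summary
--     # lines, strip the rest.
--     segments = [[]]
--     for line in lines:
--         if "Blutdruck" in line:
--             segments.append([])
--         else:
--             segments[-1].append(line)
--     if len(segments) == 1:        # no marker anywhere
--         return []
--     stream = [l for seg in segments[1:] for l in seg]
--     out = []
--     for l in stream:
--         if l.strip() == "" or not l.split(";")[0].strip():
--             break
--         if "MAD =" not in l and "Ø =" not in l:
--             out.append(l.strip())
--     return out
-- ===== Notes on version B (the rewrite author's own statement) =====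
-- stated objective: alternative
-- what changed: Replaces A's single pass with a start_collecting boolean flag by a split-on-separator algorithm: the input is partitioned into segments delimited by 'Blutdruck' marker lines (the markers vanish as separators), all segments after the first marker are concatenated into one stream, and that stream is truncated at the first blank/empty-first-field line, filtered of 'MAD ='/'Ø =' lines and stripped.
import Mathlib
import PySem

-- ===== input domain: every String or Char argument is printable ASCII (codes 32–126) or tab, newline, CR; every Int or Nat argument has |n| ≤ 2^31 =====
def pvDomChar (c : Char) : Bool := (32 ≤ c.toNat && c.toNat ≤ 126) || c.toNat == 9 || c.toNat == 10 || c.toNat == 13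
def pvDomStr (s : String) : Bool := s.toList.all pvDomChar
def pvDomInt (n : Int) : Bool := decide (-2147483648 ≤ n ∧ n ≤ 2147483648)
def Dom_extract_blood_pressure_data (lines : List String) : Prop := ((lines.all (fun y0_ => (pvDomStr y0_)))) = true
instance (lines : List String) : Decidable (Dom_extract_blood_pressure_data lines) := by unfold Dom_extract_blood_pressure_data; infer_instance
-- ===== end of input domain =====

-- B replaces A's stateful boolean-flag pass by a split-on-marker-separator
-- decomposition: build the list of segments between marker lines, then
-- truncate/filter/strip the concatenation of the segments after the first
-- marker (alternative decomposition, same cost).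


-- ===== PORT A =====
-- the three string tests both Pythons perform verbatim, named once:
-- '"Blutdruck" in line'
def pvMark (l : String) : Bool := PySem.Str.isIn "Blutdruck" l
-- 'line.strip() == "" or not line.split(";")[0].strip()'
def pvBrk (l : String) : Bool :=
  PySem.Str.strip l == "" ||
    PySem.Str.strip (((PySem.Str.split? l ";").getD []).headD "") == ""
-- '"MAD =" in line or "Ø =" in line'
def pvSkip (l : String) : Bool := PySem.Str.isIn "MAD =" l || PySem.Str.isIn "Ø =" l

-- A's loop: state = (accumulated result, start_collecting flag); break returns acc.
def pvA_loop : List String → List String → Bool → List String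
  | [], acc, _ => acc
  | l :: rest, acc, flag =>
    if pvMark l then pvA_loop rest acc true
    else if flag then
      if pvBrk l then acc
      else if pvSkip l then pvA_loop rest acc flag
      else pvA_loop rest (acc ++ [PySem.Str.strip l]) flag
    else pvA_loop rest acc flag

def extract_blood_pressure_data (lines : List String) : List String :=
  pvA_loop lines [] false

-- ===== PORT B =====
-- Source B phase 1: split on marker lines ('segments.append([])' / 'segments[-1].append(line)')
def pvSegs : List String → List (List String) → List (List String)
  | [], segs => segs
  | l :: rest, segs =>
    if pvMark l then pvSegs rest (segs ++ [[]])
    else pvSegs rest (segs.dropLast ++ [(segs.getLast?.getD []) ++ [l]])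

-- Source B phase 2: the final for-loop over the stream with break/filter/strip
def pvB_out : List String → List String → List String
  | [], out => out
  | l :: rest, out =>
    if pvBrk l then out
    else if !pvSkip l then pvB_out rest (out ++ [PySem.Str.strip l])
    else pvB_out rest out

def extract_blood_pressure_data_alt (lines : List String) : List String :=
  let segments := pvSegs lines [[]]
  if segments.length == 1 then []
  else pvB_out ((segments.drop 1).flatten) []

-- ===== PRECONDITION & SPEC =====
def Spec_extract_blood_pressure_data (lines : List String) (out : List String) : Prop := out = extract_blood_pressure_data_alt lines
instance (lines : List String) (out : List String) : Decidable (Spec_extract_blood_pressure_data lines out) := by unfold Spec_extract_blood_pressure_data; infer_instance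

-- ===== CLAIM (what is proved, stated in full; the proofs are below) =====
def Claim_equal_extract_blood_pressure_data : Prop := ∀ (lines : List String), Dom_extract_blood_pressure_data lines → Spec_extract_blood_pressure_data lines (extract_blood_pressure_data lines)

-- ===== LEMMAS AND PROOFS =====

-- the non-marker lines after the first marker line (spec glue between A and B)
def pvAfter : List String → List String
  | [] => []
  | l :: rest => if pvMark l then rest.filter (fun x => !pvMark x) else pvAfter rest

-- pvSegs only touches the last segment / appends at the end: a prefix is inert
theorem pvSegs_append (lines : List String) : ∀ (segs : List (List String)) (s : List String),
    pvSegs lines (segs ++ [s]) = segs ++ pvSegs lines [s] := by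
  induction lines with
  | nil => intro segs s; simp [pvSegs]
  | cons l rest ih =>
    intro segs s
    cases hM : pvMark l
    · simp only [pvSegs, hM, Bool.false_eq_true, if_false, List.dropLast_concat,
        List.getLast?_concat, Option.getD_some]
      have h1 : ([s].dropLast ++ [[s].getLast?.getD [] ++ [l]] : List (List String))
          = [s ++ [l]] := by simp
      rw [h1, ih segs (s ++ [l])]
    · simp only [pvSegs, hM, if_true]
      rw [ih (segs ++ [s]) [], ih [s] []]
      simp

theorem pvSegs_flatten (lines : List String) : ∀ s : List String,
    (pvSegs lines [s]).flatten = s ++ lines.filter (fun x => !pvMark x) := by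
  induction lines with
  | nil => intro s; simp [pvSegs]
  | cons l rest ih =>
    intro s
    cases hM : pvMark l
    · simp only [pvSegs, hM, Bool.false_eq_true, if_false]
      have : ([s].dropLast ++ [[s].getLast?.getD [] ++ [l]] : List (List String))
          = [s ++ [l]] := by simp
      rw [this, ih (s ++ [l])]
      simp [List.filter, hM]
    · simp only [pvSegs, hM, if_true]
      rw [show ([s] ++ [[]] : List (List String)) = [s] ++ [[]] from rfl, pvSegs_append rest [s] []]
      simp [ih, List.filter, hM]

theorem pvSegs_drop_flatten (lines : List String) : ∀ s : List String,
    ((pvSegs lines [s]).drop 1).flatten = pvAfter lines := by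
  induction lines with
  | nil => intro s; simp [pvSegs, pvAfter]
  | cons l rest ih =>
    intro s
    cases hM : pvMark l
    · simp only [pvSegs, hM, Bool.false_eq_true, if_false, pvAfter]
      have : ([s].dropLast ++ [[s].getLast?.getD [] ++ [l]] : List (List String))
          = [s ++ [l]] := by simp
      rw [this]
      exact ih (s ++ [l])
    · simp only [pvSegs, hM, if_true, pvAfter]
      rw [pvSegs_append rest [s] []]
      simp [pvSegs_flatten rest []]

theorem pvSegs_length (lines : List String) : ∀ s : List String,
    (pvSegs lines [s]).length = 1 + (lines.filter pvMark).length := by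
  induction lines with
  | nil => intro s; simp [pvSegs]
  | cons l rest ih =>
    intro s
    cases hM : pvMark l
    · simp only [pvSegs, hM, Bool.false_eq_true, if_false]
      have : ([s].dropLast ++ [[s].getLast?.getD [] ++ [l]] : List (List String))
          = [s ++ [l]] := by simp
      rw [this]
      simp [ih, List.filter, hM]
    · simp only [pvSegs, hM, if_true]
      rw [pvSegs_append rest [s] []]
      simp [ih, List.filter, hM]; omega

theorem pvAfter_no_marker (lines : List String)
    (h : (lines.filter pvMark) = []) : pvAfter lines = [] := by
  induction lines with
  | nil => rfl
  | cons l rest ih =>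
    simp only [List.filter] at h
    cases hM : pvMark l
    · simp only [pvAfter, hM, Bool.false_eq_true, if_false]
      exact ih (by simpa [hM] using h)
    · simp [hM] at h

-- B computes pvB_out of the non-marker lines after the first marker
theorem pvB_char (lines : List String) :
    extract_blood_pressure_data_alt lines = pvB_out (pvAfter lines) [] := by
  unfold extract_blood_pressure_data_alt
  by_cases h : (pvSegs lines [[]]).length = 1
  · have hf : (lines.filter pvMark) = [] := by
      have := pvSegs_length lines []
      rw [h] at this
      exact List.eq_nil_of_length_eq_zero (by omega)
    simp [h, pvAfter_no_marker lines hf, pvB_out]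
  · simp only []
    rw [if_neg (by simpa using h), pvSegs_drop_flatten lines []]

-- A's loop with the flag set is pvB_out on the remaining non-marker lines
theorem pvA_loop_true (tail : List String) : ∀ acc : List String,
    pvA_loop tail acc true = pvB_out (tail.filter (fun x => !pvMark x)) acc := by
  induction tail with
  | nil => intro acc; simp [pvA_loop, pvB_out]
  | cons l rest ih =>
    intro acc
    rw [pvA_loop]
    by_cases hM : pvMark l
    · simp [hM, List.filter, ih]
    · simp only [hM, Bool.false_eq_true, if_false, if_true, List.filter, Bool.not_false]
      by_cases hK : pvBrk l
      · simp [pvB_out, hK]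
      · by_cases hS : pvSkip l
        · simp [pvB_out, hK, hS, ih]
        · simp [pvB_out, hK, hS, ih]

-- A's loop with the flag unset equals pvB_out of pvAfter
theorem pvA_loop_false (lines : List String) :
    pvA_loop lines [] false = pvB_out (pvAfter lines) [] := by
  induction lines with
  | nil => simp [pvA_loop, pvAfter, pvB_out]
  | cons l rest ih =>
    rw [pvA_loop]
    by_cases hM : pvMark l
    · simp [hM, pvAfter, pvA_loop_true]
    · simp [hM, pvAfter, ih]

-- ===== VERDICT (by name: the statement is the Claim_ definition above) =====
theorem extract_blood_pressure_data_spec : Claim_equal_extract_blood_pressure_data := by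
  intro lines _
  unfold Spec_extract_blood_pressure_data extract_blood_pressure_data
  rw [pvA_loop_false, pvB_char]
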